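-- pv_equiv track=rewrite | github.com/ajaygm18/xdj | src/custom_stock_loader.py | _detect_currency
-- ===== SOURCE A (Python) =====
-- def _detect_currency(symbol: str) -> str:
--     """Detect currency symbol based on stock exchange."""
--     symbol = symbol.upper()
--
--     # Indian exchanges
--     if any(suffix in symbol for suffix in ['.NS', '.BO']):
--         return "₹"
--
--     # European exchanges
--     if any(suffix in symbol for suffix in ['.PA', '.DE', '.L']):
--         return "€" if '.PA' in symbol or '.DE' in symbol else "£"
--
--     # Japanese exchanges
--     if '.T' in symbol:
--         return "¥"
--
--     # Canadian exchanges
--     if '.TO' in symbol or '.V' in symbol: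
--         return "C$"
--
--     # Default to USD for US markets and others
--     return "$"
-- ===== SOURCE B (Python) =====
-- _PRIORITY = {'.NS': 0, '.BO': 0, '.PA': 1, '.DE': 1, '.L': 2, '.T': 3, '.TO': 4, '.V': 4}
-- _CURRENCIES = ['\u20b9', '\u20ac', '\u00a3', '\u00a5', 'C$']
--
-- def _detect_currency(symbol: str) -> str:
--     """Detect currency by a single left-to-right scan: at each '.' record the
--     best (lowest) priority of any exchange code anchored there."""
--     s = symbol.upper()
--     best = len(_CURRENCIES)
--     for i, ch in enumerate(s):
--         if ch == '.':
--             for code, p in _PRIORITY.items():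
--                 if p < best and s.startswith(code, i):
--                     best = p
--     return _CURRENCIES[best] if best < len(_CURRENCIES) else '$'
-- ===== Notes on version B (the rewrite author's own statement) =====
-- stated objective: alternative
-- what changed: Replaces A's ordered chain of substring-membership tests (each scanning the whole string) by a single left-to-right scan of the string that, at each dot character, takes the minimum priority of any exchange code anchored there, then maps the minimum priority to its currency (default '$').
import Mathlib
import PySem

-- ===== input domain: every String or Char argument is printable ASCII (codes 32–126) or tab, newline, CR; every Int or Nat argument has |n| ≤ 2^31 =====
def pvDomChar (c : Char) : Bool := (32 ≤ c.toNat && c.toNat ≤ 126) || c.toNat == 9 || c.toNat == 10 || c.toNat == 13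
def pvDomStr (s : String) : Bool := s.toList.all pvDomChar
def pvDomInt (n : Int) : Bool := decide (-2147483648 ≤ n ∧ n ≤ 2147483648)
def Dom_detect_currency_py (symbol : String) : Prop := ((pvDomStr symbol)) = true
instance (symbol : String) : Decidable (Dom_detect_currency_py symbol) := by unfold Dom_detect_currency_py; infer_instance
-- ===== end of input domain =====

-- B replaces the ordered membership-test chain by one left-to-right scan of the
-- string that, at each '.', records the minimum priority of any exchange code
-- anchored there (objective: alternative single-pass algorithm, same cost).

-- ===== PORT A =====
def detect_currency_py (symbol : String) : String :=
  let symbol := PySem.Str.upper symbol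
  if [".NS", ".BO"].any (fun suffix => PySem.Str.isIn suffix symbol) then "₹"
  else if [".PA", ".DE", ".L"].any (fun suffix => PySem.Str.isIn suffix symbol) then
    (if PySem.Str.isIn ".PA" symbol || PySem.Str.isIn ".DE" symbol then "€" else "£")
  else if PySem.Str.isIn ".T" symbol then "¥"
  else if PySem.Str.isIn ".TO" symbol || PySem.Str.isIn ".V" symbol then "C$"
  else "$"

-- ===== PORT B =====
-- the _PRIORITY table (codes paired with their priority)
def pvTable : List (List Char × Nat) :=
  [(".NS".toList, 0), (".BO".toList, 0), (".PA".toList, 1), (".DE".toList, 1),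
   (".L".toList, 2), (".T".toList, 3), (".TO".toList, 4), (".V".toList, 4)]

-- the _CURRENCIES list
def pvCurrencies : List String := ["₹", "€", "£", "¥", "C$"]

-- inner loop: `for code, p in _PRIORITY.items(): if p < best and s.startswith(code, i): best = p`
-- (s.startswith(code, i) holds iff code is a prefix of the current suffix s[i:])
def pvUpdate (suf : List Char) (best : Nat) : Nat :=
  pvTable.foldl (fun b cp => if cp.2 < b ∧ cp.1 <+: suf then cp.2 else b) best

-- outer loop: `for i, ch in enumerate(s): if ch == '.': ...`, recursion over suffixes
def pvScan : List Char → Nat → Nat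
  | [], best => best
  | c :: rest, best => pvScan rest (if c = '.' then pvUpdate (c :: rest) best else best)

def detect_currency_py_alt (symbol : String) : String :=
  let s := PySem.Str.upper symbol
  let best := pvScan s.toList 5
  if best < 5 then pvCurrencies.getD best "$" else "$"

-- ===== PRECONDITION & SPEC =====
def Spec_detect_currency_py (symbol : String) (out : String) : Prop := out = detect_currency_py_alt symbol
instance (symbol : String) (out : String) : Decidable (Spec_detect_currency_py symbol out) := by unfold Spec_detect_currency_py; infer_instance

-- ===== CLAIM (what is proved, stated in full; the proofs are below) =====
def Claim_equal_detect_currency_py : Prop := ∀ (symbol : String), Dom_detect_currency_py symbol → Spec_detect_currency_py symbol (detect_currency_py symbol)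

-- ===== LEMMAS AND PROOFS =====

-- priority contributed by one code over the whole string
def pvM (code : List Char) (p : Nat) (s : List Char) : Nat := if code <:+: s then p else 5

-- priorities of codes anchored at the head of `l` (min-fold over the table)
def pvAt (l : List Char) : Nat :=
  pvTable.foldl (fun m cp => min m (if cp.1 <+: l then cp.2 else 5)) 5

-- minimum priority of any code occurring anywhere in `s` (min-fold over the table)
def pvMin (s : List Char) : Nat :=
  pvTable.foldl (fun m cp => min m (pvM cp.1 cp.2 s)) 5

lemma pvM_cons (code : List Char) (p : Nat) (c : Char) (rest : List Char) (hp : p ≤ 5) :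
    pvM code p (c :: rest) = min (if code <+: c :: rest then p else 5) (pvM code p rest) := by
  simp only [pvM, List.infix_cons_iff]
  by_cases h1 : code <+: c :: rest <;> by_cases h2 : code <:+: rest <;>
    simp only [h1, h2, or_true, or_false, if_pos, if_neg, not_false_iff] <;> omega

-- a min-fold never exceeds its accumulator
lemma pvFoldMin_le {α : Type} (v : α → Nat) :
    ∀ (tbl : List α) (b : Nat), tbl.foldl (fun m cp => min m (v cp)) b ≤ b := by
  intro tbl
  induction tbl with
  | nil => intro b; exact le_rfl
  | cons cp rest ih => intro b; exact le_trans (ih (min b (v cp))) (by omega)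

-- a min-fold of a pointwise min splits into two min-folds
lemma pvFoldMin_split {α : Type} (g h : α → Nat) :
    ∀ (tbl : List α) (b c : Nat),
    tbl.foldl (fun m cp => min m (min (g cp) (h cp))) (min b c)
  = min (tbl.foldl (fun m cp => min m (g cp)) b) (tbl.foldl (fun m cp => min m (h cp)) c) := by
  intro tbl
  induction tbl with
  | nil => intro b c; rfl
  | cons cp rest ih =>
    intro b c
    simp only [List.foldl_cons]
    rw [show min (min b c) (min (g cp) (h cp)) = min (min b (g cp)) (min c (h cp)) by omega, ih]

lemma pvMin_cons (c : Char) (rest : List Char) :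
    pvMin (c :: rest) = min (pvAt (c :: rest)) (pvMin rest) := by
  unfold pvMin pvAt
  have hcong : List.foldl (fun m cp => min m (pvM cp.1 cp.2 (c :: rest))) 5 pvTable
      = List.foldl (fun m cp =>
          min m (min (if cp.1 <+: c :: rest then cp.2 else 5) (pvM cp.1 cp.2 rest))) 5 pvTable :=
    PySem.List.foldl_congr_mem pvTable _ _ 5 (by
      intro acc cp hcp
      rw [pvM_cons cp.1 cp.2 c rest (by fin_cases hcp <;> simp)])
  rw [hcong]
  exact pvFoldMin_split _ _ pvTable 5 5

lemma pvAt_le (l : List Char) : pvAt l ≤ 5 := pvFoldMin_le _ _ _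

-- one inner-loop step rewritten as a `min`
lemma pvStep (b p : Nat) (P : Prop) [Decidable P] (hb : b ≤ 5) :
    (if p < b ∧ P then p else b) = min b (if P then p else 5) := by
  by_cases h : P
  · simp only [h, and_true]
    split_ifs <;> omega
  · simp only [h, and_false, if_false]
    omega

-- the guarded fold equals a min-fold (accumulator stays ≤ 5)
lemma pvFold_eq (l : List Char) : ∀ (tbl : List (List Char × Nat)) (b : Nat), b ≤ 5 →
    tbl.foldl (fun b cp => if cp.2 < b ∧ cp.1 <+: l then cp.2 else b) b
  = tbl.foldl (fun m cp => min m (if cp.1 <+: l then cp.2 else 5)) b := by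
  intro tbl
  induction tbl with
  | nil => intro b _; rfl
  | cons cp rest ih =>
    intro b hb
    simp only [List.foldl_cons]
    rw [pvStep b cp.2 _ hb]
    exact ih _ (by omega)

-- pull the accumulator out of a min-fold
lemma pvFoldMin_acc {α : Type} (v : α → Nat) : ∀ (tbl : List α) (b c : Nat),
    tbl.foldl (fun m cp => min m (v cp)) (min b c)
  = min b (tbl.foldl (fun m cp => min m (v cp)) c) := by
  intro tbl
  induction tbl with
  | nil => intro b c; rfl
  | cons cp rest ih =>
    intro b c
    simp only [List.foldl_cons]
    rw [min_assoc, ih]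

lemma pvUpdate_eq (l : List Char) (best : Nat) (h : best ≤ 5) :
    pvUpdate l best = min best (pvAt l) := by
  unfold pvUpdate pvAt
  rw [pvFold_eq l pvTable best h,
      show best = min best 5 by omega, pvFoldMin_acc]
  omega

lemma pvAt_not_dot (c : Char) (rest : List Char) (h : c ≠ '.') : pvAt (c :: rest) = 5 := by
  have hp : ∀ (t : List Char), ('.' :: t <+: c :: rest) = False := by
    intro t
    simp only [eq_iff_iff, iff_false]
    intro hpre
    exact h (List.cons_prefix_cons.mp hpre).1.symm
  simp only [pvAt, pvTable, List.foldl_cons, List.foldl_nil]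
  rw [show (".NS".toList = '.' :: ['N','S']) from rfl, show (".BO".toList = '.' :: ['B','O']) from rfl,
      show (".PA".toList = '.' :: ['P','A']) from rfl, show (".DE".toList = '.' :: ['D','E']) from rfl,
      show (".L".toList = '.' :: ['L']) from rfl, show (".T".toList = '.' :: ['T']) from rfl,
      show (".TO".toList = '.' :: ['T','O']) from rfl, show (".V".toList = '.' :: ['V']) from rfl]
  simp [hp]

lemma pvScan_eq (s : List Char) : ∀ best, best ≤ 5 → pvScan s best = min best (pvMin s) := by
  induction s with
  | nil =>
    intro best h
    have h0 : pvMin [] = 5 := by decide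
    simp only [pvScan, h0]
    omega
  | cons c rest ih =>
    intro best h
    simp only [pvScan, pvMin_cons]
    by_cases hc : c = '.'
    · rw [if_pos hc, pvUpdate_eq _ _ h,
        ih _ (by have := pvAt_le (c :: rest); omega)]
      omega
    · rw [if_neg hc, ih _ h, pvAt_not_dot c rest hc]
      omega

-- ===== VERDICT (by name: the statement is the Claim_ definition above) =====
theorem detect_currency_py_spec : Claim_equal_detect_currency_py := by
  intro symbol _
  unfold Spec_detect_currency_py detect_currency_py detect_currency_py_alt
  simp only [List.any_cons, List.any_nil, Bool.or_false]
  rw [pvScan_eq _ 5 (by omega)]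
  set s := PySem.Str.upper symbol with hs
  simp only [pvMin, pvTable, List.foldl_cons, List.foldl_nil, pvM]
  by_cases h1 : ".NS".toList <:+: s.toList <;> by_cases h2 : ".BO".toList <:+: s.toList <;>
  by_cases h3 : ".PA".toList <:+: s.toList <;> by_cases h4 : ".DE".toList <:+: s.toList <;>
  by_cases h5 : ".L".toList <:+: s.toList <;> by_cases h6 : ".T".toList <:+: s.toList <;>
  by_cases h7 : ".TO".toList <:+: s.toList <;> by_cases h8 : ".V".toList <:+: s.toList <;>
    simp only [h1, h2, h3, h4, h5, h6, h7, h8, if_pos, if_neg, not_false_iff,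
      PySem.Str.isIn_iff_infix, Bool.or_eq_true, or_true, or_false] <;>
    norm_num [pvCurrencies]
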